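-- pv_equiv track=rewrite | github.com/so-groenen/swendsen_wang_ising | simulation_manager/main.py | get_default_monte_carlo_parameters
-- ===== SOURCE A (Python) =====
-- def get_default_monte_carlo_parameters(lengths: list[int]) -> tuple[dict, dict]:
--     """Parameters optimized for my machine (8Gb RAM, quadcore 2Ghz CPU (intel i7 8thGen))"""
--     """Feel free to adapt for your machine"""
--
--     thermalisation_steps = dict()
--     measurement_steps    = dict()
--     for L in lengths:
--         if L <= 64:
--             thermalisation_steps[L] = int(5e5)
--             measurement_steps[L]    = int(5e5)
--         elif L<= 128:
--             thermalisation_steps[L] = int(1e5)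
--             measurement_steps[L]    = int(1e5)
--         elif L<= 256:
--             thermalisation_steps[L] = int(5e4)
--             measurement_steps[L]    = int(5e4)
--         elif L<= 512:
--             thermalisation_steps[L] = int(1e4)
--             measurement_steps[L]    = int(1e4)
--         else:
--             thermalisation_steps[L] = int(1e3)
--             measurement_steps[L]    = int(1e3)
--     return (thermalisation_steps, measurement_steps)
-- ===== SOURCE B (Python) =====
-- def get_default_monte_carlo_parameters(lengths: list[int]) -> tuple[dict, dict]:
--     thresholds = [64, 128, 256, 512]
--     values = [500000, 100000, 50000, 10000, 1000]
--     # Linear merge sweep: walk the sorted distinct lengths and the sorted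
--     # thresholds together with one monotone pointer (no per-element search
--     # and no per-element comparison cascade), then rebuild in input order.
--     value_of = {}
--     i = 0
--     for L in sorted(set(lengths)):
--         while i < len(thresholds) and thresholds[i] < L:
--             i += 1
--         value_of[L] = values[i]
--     steps = {L: value_of[L] for L in lengths}
--     return (steps, dict(steps))
-- ===== Notes on version B (the rewrite author's own statement) =====
-- stated objective: alternative
-- what changed: Instead of classifying each length independently with the if/elif cascade, B sorts the distinct lengths and merges them against the sorted threshold table with one monotone pointer (a two-pointer sweep), then rebuilds the dicts in original input order from that map.
import Mathlib
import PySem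

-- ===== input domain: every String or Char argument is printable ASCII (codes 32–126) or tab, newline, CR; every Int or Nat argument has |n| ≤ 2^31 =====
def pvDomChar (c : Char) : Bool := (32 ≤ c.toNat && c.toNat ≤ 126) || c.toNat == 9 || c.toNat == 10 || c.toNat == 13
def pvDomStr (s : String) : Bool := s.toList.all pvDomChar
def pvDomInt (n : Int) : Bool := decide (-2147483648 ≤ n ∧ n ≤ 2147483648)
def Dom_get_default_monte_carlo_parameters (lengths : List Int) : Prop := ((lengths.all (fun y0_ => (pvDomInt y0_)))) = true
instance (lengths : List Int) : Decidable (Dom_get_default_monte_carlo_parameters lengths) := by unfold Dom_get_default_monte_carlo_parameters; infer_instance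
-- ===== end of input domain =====

-- B replaces A's per-element if/elif cascade by a two-pointer merge sweep over the
-- sorted distinct lengths and the sorted threshold table (objective: alternative).

-- ===== PORT A =====
def get_default_monte_carlo_parameters (lengths : List Int) : (List (Int × Int)) × (List (Int × Int)) :=
  let s := lengths.foldl (fun (s : PySem.Dict Int Int × PySem.Dict Int Int) L =>
    if L ≤ 64 then (s.1.insert L 500000, s.2.insert L 500000)
    else if L ≤ 128 then (s.1.insert L 100000, s.2.insert L 100000)
    else if L ≤ 256 then (s.1.insert L 50000, s.2.insert L 50000)
    else if L ≤ 512 then (s.1.insert L 10000, s.2.insert L 10000)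
    else (s.1.insert L 1000, s.2.insert L 1000)) (PySem.Dict.empty, PySem.Dict.empty)
  (s.1.items, s.2.items)

-- ===== PORT B =====
def pvThresholds : List Int := [64, 128, 256, 512]
def pvValues : List Int := [500000, 100000, 50000, 10000, 1000]

-- the inner 'while i < len(thresholds) and thresholds[i] < L: i += 1'
-- (thresholds[i] read under the guard i < len, so getD never uses its default)
def pvAdv (i : Nat) (L : Int) : Nat :=
  if i < pvThresholds.length ∧ pvThresholds.getD i 0 < L then pvAdv (i + 1) L else i
  termination_by pvThresholds.length - i

-- the 'for L in sorted(set(lengths))' sweep filling value_of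
def pvSweep : List Int → Nat → PySem.Dict Int Int → PySem.Dict Int Int
  | [], _, d => d
  | L :: rest, i, d =>
    let j := pvAdv i L
    -- values[j]: j ≤ 4 always, so getD never uses its default
    pvSweep rest j (d.insert L (pvValues.getD j 0))

def get_default_monte_carlo_parameters_alt (lengths : List Int) : (List (Int × Int)) × (List (Int × Int)) :=
  let value_of := pvSweep (PySem.List.sorted (PySem.Set.ofList lengths) (fun x => x) false) 0 PySem.Dict.empty
  -- steps = {L: value_of[L] for L in lengths}; every L is a key of value_of, so getD never uses its default
  let steps := lengths.foldl (fun (d : PySem.Dict Int Int) L => d.insert L (value_of.getD L 0)) PySem.Dict.empty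
  (steps.items, steps.items)

-- ===== PRECONDITION & SPEC =====
def Spec_get_default_monte_carlo_parameters (lengths : List Int) (out : (List (Int × Int)) × (List (Int × Int))) : Prop := out = get_default_monte_carlo_parameters_alt lengths
instance (lengths : List Int) (out : (List (Int × Int)) × (List (Int × Int))) : Decidable (Spec_get_default_monte_carlo_parameters lengths out) := by unfold Spec_get_default_monte_carlo_parameters; infer_instance

-- ===== CLAIM (what is proved, stated in full; the proofs are below) =====
def Claim_equal_get_default_monte_carlo_parameters : Prop := ∀ (lengths : List Int), Dom_get_default_monte_carlo_parameters lengths → Spec_get_default_monte_carlo_parameters lengths (get_default_monte_carlo_parameters lengths)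

-- ===== LEMMAS AND PROOFS =====

-- A's per-element piecewise value, and the bracket index it lives at
def pvPiece (L : Int) : Int :=
  if L ≤ 64 then 500000 else if L ≤ 128 then 100000 else if L ≤ 256 then 50000
  else if L ≤ 512 then 10000 else 1000

def pvCnt (L : Int) : Nat :=
  if L ≤ 64 then 0 else if L ≤ 128 then 1 else if L ≤ 256 then 2
  else if L ≤ 512 then 3 else 4

theorem pvCnt_mono {L1 L2 : Int} (h : L1 ≤ L2) : pvCnt L1 ≤ pvCnt L2 := by
  unfold pvCnt; split_ifs <;> omega

theorem pvValues_pvCnt (L : Int) : pvValues.getD (pvCnt L) 0 = pvPiece L := by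
  unfold pvCnt pvPiece; split_ifs <;> rfl

theorem pvAdv_cnt (L : Int) : ∀ i : Nat, i ≤ pvCnt L → pvAdv i L = pvCnt L := by
  intro i hi
  have e : ∀ j, pvAdv j L = if j < pvThresholds.length ∧ pvThresholds.getD j 0 < L then pvAdv (j+1) L else j := fun j => by rw [pvAdv]
  have e4 : pvAdv 4 L = 4 := by rw [e 4]; simp [pvThresholds]
  have e3 : pvAdv 3 L = if 512 < L then 4 else 3 := by
    rw [e 3]; simp [pvThresholds]; split_ifs <;> simp [e4]
  have e2 : pvAdv 2 L = if 256 < L then pvAdv 3 L else 2 := by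
    rw [e 2]; simp [pvThresholds]
  have e1 : pvAdv 1 L = if 128 < L then pvAdv 2 L else 1 := by
    rw [e 1]; simp [pvThresholds]
  have e0 : pvAdv 0 L = if 64 < L then pvAdv 1 L else 0 := by
    rw [e 0]; simp [pvThresholds]
  unfold pvCnt at hi ⊢
  split_ifs at hi ⊢ with h1 h2 h3 h4 <;> interval_cases i <;>
    simp only [e0, e1, e2, e3, e4] <;> split_ifs <;> omega

theorem pvSweep_get? (s : List Int) : ∀ (i : Nat) (d : PySem.Dict Int Int),
    s.Pairwise (· < ·) → (∀ L ∈ s, i ≤ pvCnt L) →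
    ∀ L : Int, (pvSweep s i d).get? L =
      if L ∈ s then some (pvValues.getD (pvCnt L) 0) else d.get? L := by
  induction s with
  | nil => intro i d _ _ L; simp [pvSweep]
  | cons L0 rest ih =>
    intro i d hpw hlo L
    have hj : pvAdv i L0 = pvCnt L0 := pvAdv_cnt L0 i (hlo L0 (List.mem_cons_self))
    have hpw' := (List.pairwise_cons.mp hpw)
    have hrec := ih (pvAdv i L0) (d.insert L0 (pvValues.getD (pvAdv i L0) 0)) hpw'.2
      (fun L hL => by rw [hj]; exact pvCnt_mono (le_of_lt (hpw'.1 L hL)))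
    simp only [pvSweep]
    rw [hrec L]
    by_cases hLr : L ∈ rest
    · simp [hLr, List.mem_cons]
    · by_cases hL0 : L = L0
      · subst hL0
        simp [hLr, hj, PySem.Dict.get?_insert_self]
      · simp [hLr, hL0, PySem.Dict.get?_insert_of_ne _ _ hL0]

-- A's fold on the pair of dicts keeps the two components equal and equal to one pvPiece fold
theorem pvA_fold (l : List Int) : ∀ d : PySem.Dict Int Int,
    l.foldl (fun (s : PySem.Dict Int Int × PySem.Dict Int Int) L =>
      if L ≤ 64 then (s.1.insert L 500000, s.2.insert L 500000)
      else if L ≤ 128 then (s.1.insert L 100000, s.2.insert L 100000)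
      else if L ≤ 256 then (s.1.insert L 50000, s.2.insert L 50000)
      else if L ≤ 512 then (s.1.insert L 10000, s.2.insert L 10000)
      else (s.1.insert L 1000, s.2.insert L 1000)) (d, d)
    = (l.foldl (fun d L => d.insert L (pvPiece L)) d,
       l.foldl (fun d L => d.insert L (pvPiece L)) d) := by
  induction l with
  | nil => intro d; rfl
  | cons L rest ih =>
    intro d
    have hstep : (if L ≤ 64 then ((d.insert L 500000 : PySem.Dict Int Int), d.insert L 500000)
      else if L ≤ 128 then (d.insert L 100000, d.insert L 100000)
      else if L ≤ 256 then (d.insert L 50000, d.insert L 50000)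
      else if L ≤ 512 then (d.insert L 10000, d.insert L 10000)
      else (d.insert L 1000, d.insert L 1000)) = (d.insert L (pvPiece L), d.insert L (pvPiece L)) := by
      unfold pvPiece; split_ifs <;> rfl
    simp only [List.foldl_cons, hstep, ih]

-- ===== VERDICT (by name: the statement is the Claim_ definition above) =====
theorem get_default_monte_carlo_parameters_spec : Claim_equal_get_default_monte_carlo_parameters := by
  intro lengths _
  unfold Spec_get_default_monte_carlo_parameters
  unfold get_default_monte_carlo_parameters get_default_monte_carlo_parameters_alt
  rw [pvA_fold]
  have hlookup : ∀ L ∈ lengths,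
      ((pvSweep (PySem.List.sorted (PySem.Set.ofList lengths) (fun x => x) false) 0 PySem.Dict.empty).getD L 0)
        = pvPiece L := by
    intro L hL
    have hmem : L ∈ PySem.List.sorted (PySem.Set.ofList lengths) (fun x => x) false := by
      rw [PySem.List.mem_sorted, PySem.Set.mem_ofList]; exact hL
    have := pvSweep_get? (PySem.List.sorted (PySem.Set.ofList lengths) (fun x => x) false)
      0 PySem.Dict.empty (PySem.List.sorted_ofList_pairwise_lt lengths)
      (fun _ _ => Nat.zero_le _) L
    rw [if_pos hmem] at this
    rw [PySem.Dict.getD_eq_get?_getD, this, Option.getD_some, pvValues_pvCnt]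
  have hfold : lengths.foldl (fun (d : PySem.Dict Int Int) L =>
        d.insert L ((pvSweep (PySem.List.sorted (PySem.Set.ofList lengths) (fun x => x) false) 0 PySem.Dict.empty).getD L 0))
        PySem.Dict.empty
      = lengths.foldl (fun d L => d.insert L (pvPiece L)) PySem.Dict.empty := by
    apply PySem.List.foldl_congr_mem
    intro acc x hx; rw [hlookup x hx]
  simp only [hfold]
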